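-- pv_equiv track=rewrite | github.com/AhmedSama/ZainCash-product-development-test | Code/code_simple_solution/format.py | group_employee_to_its_files
-- ===== SOURCE A (Python) =====
-- def group_employee_to_its_files(file_list):
--     # Output list of each employee with their list of files
--     employee_files_output = []
--
--     # Map the employee name to its index inside the employee_files list
--     employee_index_map = {}
--
--     # Iterate through the input list and organize files
--     for file_info in file_list:
--         file_name, employee_name = list(file_info.items())[0]
--
--         # If the employee name is not registered yet
--         if employee_name not in employee_index_map:
--             # Add the employee name with the file to the output
--             employee_files_output.append({employee_name: [file_name]})
--
--             # Map the employee name to its index inside the employee_files list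
--             employee_index_map[employee_name] = len(employee_files_output) - 1
--         else:
--             # If the employee name is already registered
--             # Get its index from the employee_index_map
--             index = employee_index_map[employee_name]
--
--             # Get the employee and their files from the index
--             employee_and_its_files = employee_files_output[index]
--
--             # Add the new file to the employee
--             employee_and_its_files[employee_name].append(file_name)
--
--     return employee_files_output
-- ===== SOURCE B (Python) =====
-- def group_employee_to_its_files(file_list):
--     # Staged passes: extract the (file, employee) pairs once, compute the
--     # first-seen employee order, then rebuild each group by scanning the pairs.
--     pairs = [list(file_info.items())[0] for file_info in file_list]
--     order = []
--     for _, employee in pairs: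
--         if employee not in order:
--             order.append(employee)
--     return [{employee: [f for f, e in pairs if e == employee]}
--             for employee in order]
-- ===== Notes on version B (the rewrite author's own statement) =====
-- stated objective: alternative
-- what changed: Replaces the single pass that mutates an output list through a name-to-index map by staged passes: extract the (file, employee) pairs, compute the first-seen employee order by a list-membership scan, then rebuild each employee's group with a comprehension that rescans the pairs.
-- outside the precondition, e.g. on group_employee_to_its_files([{}]): A raises IndexError, B raises IndexError
import Mathlib
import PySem

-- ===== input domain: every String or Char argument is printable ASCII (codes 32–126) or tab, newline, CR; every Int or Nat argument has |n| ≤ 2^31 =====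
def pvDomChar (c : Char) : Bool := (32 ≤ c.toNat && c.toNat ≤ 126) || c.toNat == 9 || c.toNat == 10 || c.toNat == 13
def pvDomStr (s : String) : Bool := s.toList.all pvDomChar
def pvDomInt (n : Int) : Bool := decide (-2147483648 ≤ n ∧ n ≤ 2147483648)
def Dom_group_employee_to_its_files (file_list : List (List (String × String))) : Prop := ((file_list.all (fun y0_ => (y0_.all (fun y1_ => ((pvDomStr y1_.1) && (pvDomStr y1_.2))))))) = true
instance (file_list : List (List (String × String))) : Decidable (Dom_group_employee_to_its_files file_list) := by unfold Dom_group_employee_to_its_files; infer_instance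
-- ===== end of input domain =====

-- ===== PORT A =====
-- B replaces A's single mutating pass (output list + name->index map) by staged
-- passes: extract the pairs, compute first-seen order, rescan the pairs per
-- employee (objective: alternative). Neither Python mutates its argument.
-- Port of A: fold over file_list carrying (output, name->index map).
-- `list(file_info.items())[0]` is ported as the head of (Dict.ofList fi).items,
-- exact for the dict the association list denotes (duplicate keys overwrite).
-- On an empty inner dict Python raises IndexError (excluded by Pre_); the port skips it.
def group_employee_to_its_files (file_list : List (List (String × String))) : List (List (String × List String)) :=
  (file_list.foldl (fun (st : List (List (String × List String)) × PySem.Dict String Nat) fi =>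
    match (PySem.Dict.ofList fi).items.head? with
    | none => st
    | some (file_name, employee_name) =>
      match st.2.get? employee_name with
      | none =>
        (st.1 ++ [[(employee_name, [file_name])]], st.2.insert employee_name st.1.length)
      | some index =>
        -- employee_files_output[index][employee_name].append(file_name), in place
        (st.1.set index ((st.1.getD index []).map (fun p =>
            if p.1 = employee_name then (p.1, p.2 ++ [file_name]) else p)), st.2))
    ([], PySem.Dict.empty)).1

-- ===== PORT B =====
-- Port of B's staged passes: pairs, then first-seen order via list membership,
-- then one comprehension rescanning pairs per employee. On an empty inner dict
-- Python raises (excluded by Pre_); the port's headD default is unreachable there.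
def group_employee_to_its_files_alt (file_list : List (List (String × String))) : List (List (String × List String)) :=
  let pairs := file_list.map (fun file_info => (PySem.Dict.ofList file_info).items.headD ("", ""))
  let order := pairs.foldl (fun s p => if p.2 ∈ s then s else s ++ [p.2]) []
  order.map (fun employee => [(employee, (pairs.filter (fun p => p.2 == employee)).map Prod.fst)])

-- ===== PRECONDITION & SPEC =====
-- A raises IndexError on `list(file_info.items())[0]` when some file_info is the
-- empty dict; B raises there too. Pre_ excludes exactly those inputs.
def Pre_group_employee_to_its_files (file_list : List (List (String × String))) : Prop :=
  ∀ fi ∈ file_list, fi ≠ []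
instance (file_list : List (List (String × String))) : Decidable (Pre_group_employee_to_its_files file_list) := by unfold Pre_group_employee_to_its_files; infer_instance
def pvWitness_group_employee_to_its_files : (List (List (String × String))) :=
  [[("r1.txt", "Ann")], [("r2.txt", "Bob")], [("r3.txt", "Ann")]]
def Spec_group_employee_to_its_files (file_list : List (List (String × String))) (out : List (List (String × List String))) : Prop := out = group_employee_to_its_files_alt file_list
instance (file_list : List (List (String × String))) (out : List (List (String × List String))) : Decidable (Spec_group_employee_to_its_files file_list out) := by unfold Spec_group_employee_to_its_files; infer_instance

-- ===== CLAIM (what is proved, stated in full; the proofs are below) =====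
def Claim_equal_group_employee_to_its_files : Prop := ∀ (file_list : List (List (String × String))), Dom_group_employee_to_its_files file_list → Pre_group_employee_to_its_files file_list → Spec_group_employee_to_its_files file_list (group_employee_to_its_files file_list)

-- ===== LEMMAS AND PROOFS =====

-- A's step, rephrased over an already-extracted (file, employee) pair.
def pvStepA (st : List (List (String × List String)) × PySem.Dict String Nat)
    (p : String × String) : List (List (String × List String)) × PySem.Dict String Nat :=
  match st.2.get? p.2 with
  | none => (st.1 ++ [[(p.2, [p.1])]], st.2.insert p.2 st.1.length)
  | some index =>
    (st.1.set index ((st.1.getD index []).map (fun q =>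
        if q.1 = p.2 then (q.1, q.2 ++ [p.1]) else q)), st.2)

-- B's building blocks over the pair list.
def pvSeen (l : List (String × String)) : List String :=
  l.foldl (fun s p => if p.2 ∈ s then s else s ++ [p.2]) []

def pvFiles (l : List (String × String)) (e : String) : List String :=
  (l.filter (fun p => p.2 == e)).map Prod.fst

theorem pvSeen_append (l : List (String × String)) (p : String × String) :
    pvSeen (l ++ [p]) = if p.2 ∈ pvSeen l then pvSeen l else pvSeen l ++ [p.2] := by
  simp [pvSeen, List.foldl_append]

theorem pvFiles_append (l : List (String × String)) (p : String × String) (e : String) :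
    pvFiles (l ++ [p]) e = pvFiles l e ++ (if p.2 = e then [p.1] else []) := by
  simp only [pvFiles, List.filter_append]
  split_ifs with h <;> simp [h]

theorem mem_pvSeen_aux (l : List (String × String)) (s : List String) (e : String) :
    e ∈ l.foldl (fun s p => if p.2 ∈ s then s else s ++ [p.2]) s ↔ e ∈ s ∨ ∃ p ∈ l, p.2 = e := by
  induction l generalizing s with
  | nil => simp
  | cons q rest ih =>
    simp only [List.foldl_cons, ih]
    constructor
    · rintro (h | h)
      · split_ifs at h with hq
        · exact .inl h
        · rcases List.mem_append.mp h with h | h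
          · exact .inl h
          · exact .inr ⟨q, by simp, (by simpa using h : e = q.2).symm⟩
      · obtain ⟨p, hp, hpe⟩ := h
        exact .inr ⟨p, by simp [hp], hpe⟩
    · rintro (h | ⟨p, hp, hpe⟩)
      · left; split_ifs <;> simp [h]
      · rcases List.mem_cons.mp hp with rfl | hp'
        · left; split_ifs with hq
          · exact hpe ▸ hq
          · simp [hpe]
        · exact .inr ⟨p, hp', hpe⟩

theorem mem_pvSeen (l : List (String × String)) (e : String) :
    e ∈ pvSeen l ↔ ∃ p ∈ l, p.2 = e := by
  simpa using mem_pvSeen_aux l [] e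

theorem nodup_pvSeen_aux (l : List (String × String)) (s : List String) (hs : s.Nodup) :
    (l.foldl (fun s p => if p.2 ∈ s then s else s ++ [p.2]) s).Nodup := by
  induction l generalizing s with
  | nil => exact hs
  | cons q rest ih =>
    simp only [List.foldl_cons]
    apply ih
    split_ifs with hq
    · exact hs
    · rw [List.nodup_append]
      refine ⟨hs, by simp, ?_⟩
      intro a ha b hb
      simp only [List.mem_singleton] at hb
      subst hb
      exact fun heq => hq (heq ▸ ha)

theorem nodup_pvSeen (l : List (String × String)) : (pvSeen l).Nodup :=
  nodup_pvSeen_aux l [] List.nodup_nil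

theorem pvFiles_nil_of_not_mem (l : List (String × String)) (e : String)
    (h : e ∉ pvSeen l) : pvFiles l e = [] := by
  rw [pvFiles, List.map_eq_nil_iff, List.filter_eq_nil_iff]
  intro p hp
  simp only [beq_iff_eq]
  intro hpe
  exact h ((mem_pvSeen l e).mpr ⟨p, hp, hpe⟩)

-- The invariant A's fold maintains, phrased against B's staged quantities.
def pvInv (l : List (String × String))
    (st : List (List (String × List String)) × PySem.Dict String Nat) : Prop :=
  st.1 = (pvSeen l).map (fun e => [(e, pvFiles l e)]) ∧
  (∀ k, st.2.get? k = if k ∈ pvSeen l then some ((pvSeen l).idxOf k) else none)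

theorem pvInv_step (l : List (String × String))
    (st : List (List (String × List String)) × PySem.Dict String Nat)
    (p : String × String) (h : pvInv l st) : pvInv (l ++ [p]) (pvStepA st p) := by
  obtain ⟨h1, h2⟩ := h
  obtain ⟨fn, en⟩ := p
  have hnd := nodup_pvSeen l
  by_cases hc : en ∈ pvSeen l
  · -- registered employee: A mutates output[index], seen/index map unchanged
    have hseen : pvSeen (l ++ [(fn, en)]) = pvSeen l := by rw [pvSeen_append]; simp [hc]
    have hidx : st.2.get? en = some ((pvSeen l).idxOf en) := by rw [h2]; simp [hc]
    set i := (pvSeen l).idxOf en with hidef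
    have hilt : i < (pvSeen l).length := List.idxOf_lt_length_of_mem hc
    have hi_en : (pvSeen l)[i]'hilt = en := List.getElem_idxOf hilt
    constructor
    · show (pvStepA st (fn, en)).1 = _
      rw [pvStepA]
      simp only [hidx]
      rw [hseen, h1]
      have hget : ((pvSeen l).map (fun e => [(e, pvFiles l e)])).getD i []
          = [((pvSeen l)[i]'hilt, pvFiles l ((pvSeen l)[i]'hilt))] := by
        rw [List.getD_eq_getElem _ _ (by simpa using hilt)]
        simp
      rw [hget, hi_en]
      apply List.ext_getElem
      · simp
      · intro j hj1 hj2
        simp only [List.getElem_set, List.getElem_map]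
        by_cases hji : i = j
        · subst hji
          simp [hi_en, pvFiles_append]
        · have hne : (pvSeen l)[j]'(by simpa using hj2) ≠ en := by
            intro heq
            apply hji
            have : (pvSeen l)[i]'hilt = (pvSeen l)[j]'(by simpa using hj2) := by
              rw [hi_en, heq]
            exact (List.Nodup.getElem_inj_iff hnd).mp this
          simp [hji, pvFiles_append, Ne.symm hne]
    · intro k
      show (pvStepA st (fn, en)).2.get? k = _
      rw [pvStepA]
      simp only [hidx]
      rw [h2, hseen]
  · -- new employee: A appends and registers the index
    have hseen : pvSeen (l ++ [(fn, en)]) = pvSeen l ++ [en] := by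
      rw [pvSeen_append]; simp [hc]
    have hidx : st.2.get? en = none := by rw [h2]; simp [hc]
    have hlen : st.1.length = (pvSeen l).length := by rw [h1]; simp
    constructor
    · show (pvStepA st (fn, en)).1 = _
      rw [pvStepA]
      simp only [hidx]
      rw [hseen, List.map_append, h1]
      congr 1
      · apply List.map_congr_left
        intro e he
        have hne : en ≠ e := fun h => hc (h ▸ he)
        simp [pvFiles_append, hne]
      · simp [pvFiles_append, pvFiles_nil_of_not_mem l en hc]
    · intro k
      show (pvStepA st (fn, en)).2.get? k = _
      rw [pvStepA]
      simp only [hidx]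
      rw [PySem.Dict.get?_insert, hseen]
      by_cases hk : k = en
      · subst hk
        simp [List.idxOf_append_of_notMem hc, hlen]
      · rw [if_neg (by simpa using hk), h2]
        by_cases hk2 : k ∈ pvSeen l
        · simp [hk2, hk, List.idxOf_append_of_mem hk2]
        · have : k ∉ pvSeen l ++ [en] := by simp [hk2, hk]
          simp [hk2, this]

theorem pvInv_foldl (l : List (String × String)) :
    pvInv l (l.foldl pvStepA ([], PySem.Dict.empty)) := by
  induction l using List.reverseRecOn with
  | nil =>
    constructor
    · simp [pvSeen]
    · intro k; simp [pvSeen, PySem.Dict.empty, PySem.Dict.get?]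
  | append_singleton l p ih =>
    rw [List.foldl_append, List.foldl_cons, List.foldl_nil]
    exact pvInv_step l _ p ih

-- Under Pre_, A's fold over file_list is the fold of pvStepA over the extracted pairs.
theorem foldA_eq_pairs (file_list : List (List (String × String)))
    (st : List (List (String × List String)) × PySem.Dict String Nat)
    (hpre : ∀ fi ∈ file_list, fi ≠ []) :
    (file_list.foldl (fun (st : List (List (String × List String)) × PySem.Dict String Nat) fi =>
      match (PySem.Dict.ofList fi).items.head? with
      | none => st
      | some (file_name, employee_name) =>
        match st.2.get? employee_name with
        | none =>
          (st.1 ++ [[(employee_name, [file_name])]], st.2.insert employee_name st.1.length)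
        | some index =>
          (st.1.set index ((st.1.getD index []).map (fun p =>
              if p.1 = employee_name then (p.1, p.2 ++ [file_name]) else p)), st.2)) st)
    = (file_list.map (fun fi => (PySem.Dict.ofList fi).items.headD ("", ""))).foldl pvStepA st := by
  induction file_list generalizing st with
  | nil => rfl
  | cons fi rest ih =>
    have hfi : fi ≠ [] := hpre fi (by simp)
    have hitems : (PySem.Dict.ofList fi).items ≠ [] := by
      -- ofList is a foldl of inserts; each insert keeps items nonempty or appends
      have key : ∀ (l : List (String × String)) (d : PySem.Dict String String),
          l ≠ [] ∨ d.items ≠ [] →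
          (l.foldl (fun d p => d.insert p.1 p.2) d).items ≠ [] := by
        intro l
        induction l with
        | nil => intro d h; exact h.resolve_left (by simp)
        | cons q qs ihq =>
          intro d _
          rw [List.foldl_cons]
          apply ihq
          right
          rw [PySem.Dict.items_insert]
          split
          next h =>
            intro hnil
            have hd : d.items = [] := List.map_eq_nil_iff.mp hnil
            rw [PySem.Dict.contains_eq_decide_mem_keys] at h
            simp [PySem.Dict.keys, hd] at h
          next => simp
      exact key fi PySem.Dict.empty (.inl hfi)
    have hhead : (PySem.Dict.ofList fi).items.head?
        = some ((PySem.Dict.ofList fi).items.headD ("", "")) := by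
      cases hx : (PySem.Dict.ofList fi).items with
      | nil => exact absurd hx hitems
      | cons a as => simp
    rw [List.foldl_cons, List.map_cons, List.foldl_cons, hhead]
    have hstep : (match some ((PySem.Dict.ofList fi).items.headD ("", "")) with
      | none => st
      | some (file_name, employee_name) =>
        match st.2.get? employee_name with
        | none =>
          (st.1 ++ [[(employee_name, [file_name])]], st.2.insert employee_name st.1.length)
        | some index =>
          (st.1.set index ((st.1.getD index []).map (fun p =>
              if p.1 = employee_name then (p.1, p.2 ++ [file_name]) else p)), st.2))
        = pvStepA st ((PySem.Dict.ofList fi).items.headD ("", "")) := by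
      obtain ⟨fn, en⟩ := (PySem.Dict.ofList fi).items.headD ("", "")
      rfl
    rw [hstep]
    exact ih _ (fun g hg => hpre g (by simp [hg]))

-- ===== VERDICT (by name: the statement is the Claim_ definition above) =====
theorem group_employee_to_its_files_spec : Claim_equal_group_employee_to_its_files := by
  intro file_list _ hpre
  unfold Spec_group_employee_to_its_files group_employee_to_its_files group_employee_to_its_files_alt
  rw [foldA_eq_pairs file_list ([], PySem.Dict.empty) hpre]
  set pairs := file_list.map (fun fi => (PySem.Dict.ofList fi).items.headD ("", "")) with hp
  have h := (pvInv_foldl pairs).1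
  rw [h]
  rfl
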